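-- pv_equiv track=rewrite | github.com/josteint/sidfinity | deprecated/python_experiments/hubbard_z3_wavetable.py | segment_notes
-- ===== SOURCE A (Python) =====
-- def segment_notes(frames, voice_off):
--     """Segment frames into notes by gate-on transitions.
--
--     Returns list of dicts: {base_fhi, frames: [(fl, fh, ctrl), ...]}
--     """
--     notes = []
--     current = []
--     prev_gate = 0
--
--     for regs in frames:
--         fl = regs[voice_off]
--         fh = regs[voice_off + 1]
--         ctrl = regs[voice_off + 4]
--         gate = ctrl & 0x01
--
--         if gate and not prev_gate:
--             # Rising gate edge = new note
--             if current:
--                 notes.append(current)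
--             current = [(fl, fh, ctrl)]
--         elif current:
--             current.append((fl, fh, ctrl))
--
--         prev_gate = gate
--
--     if current:
--         notes.append(current)
--
--     return notes
-- ===== SOURCE B (Python) =====
-- def segment_notes(frames, voice_off):
--     """Segment frames into notes by gate-on transitions (two-pass, back-to-front)."""
--     def gate(r):
--         return r[voice_off + 4] & 1
--
--     def tri(r):
--         return (r[voice_off], r[voice_off + 1], r[voice_off + 4])
--
--     gates = [gate(r) for r in frames]
--     edges = [bool(g) and not p for g, p in zip(gates, [0] + gates)]
--     pending, notes = [], []
--     for r, e in zip(reversed(frames), reversed(edges)):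
--         if e:
--             pending, notes = [], [[tri(r)] + pending] + notes
--         else:
--             pending = [tri(r)] + pending
--     return notes
-- ===== Notes on version B (the rewrite author's own statement) =====
-- stated objective: alternative
-- what changed: A's single accumulator loop (notes/current/prev_gate state) is replaced by a two-pass decomposition: precompute per-frame rising-edge flags from the gate sequence, then assemble the notes back-to-front by folding over the reversed (frame, edge) pairs.
import Mathlib
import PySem

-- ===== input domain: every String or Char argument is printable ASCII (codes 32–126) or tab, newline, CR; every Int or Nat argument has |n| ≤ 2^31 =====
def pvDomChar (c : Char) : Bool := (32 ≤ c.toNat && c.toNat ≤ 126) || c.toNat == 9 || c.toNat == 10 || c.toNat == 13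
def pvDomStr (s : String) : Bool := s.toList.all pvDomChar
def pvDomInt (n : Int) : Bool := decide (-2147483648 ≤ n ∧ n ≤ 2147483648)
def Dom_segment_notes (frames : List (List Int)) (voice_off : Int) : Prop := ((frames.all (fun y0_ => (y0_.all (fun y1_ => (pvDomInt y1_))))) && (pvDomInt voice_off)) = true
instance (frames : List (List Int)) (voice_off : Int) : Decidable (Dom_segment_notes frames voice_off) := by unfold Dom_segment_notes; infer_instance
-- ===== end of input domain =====

-- B replaces A's one-pass accumulator loop by a two-pass decomposition (precompute
-- rising-edge flags, then build the notes back-to-front over the reversed frames);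
-- objective: alternative decomposition, not speed. Equal on Pre_ (no IndexError).

-- ===== PORT A =====
-- literal transliteration of A's loop: state = (notes, current, prev_gate);
-- regs[i] ported as pyGetD (exact under Pre_, which rules out IndexError)
def segment_notes (frames : List (List Int)) (voice_off : Int) : List (List (Int × Int × Int)) :=
  let fin := frames.foldl
    (fun (st : List (List (Int × Int × Int)) × List (Int × Int × Int) × Int) regs =>
      let notes := st.1
      let current := st.2.1
      let prev_gate := st.2.2
      let fl := PySem.List.pyGetD regs voice_off 0
      let fh := PySem.List.pyGetD regs (voice_off + 1) 0
      let ctrl := PySem.List.pyGetD regs (voice_off + 4) 0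
      let gate := PySem.Int.band ctrl 1
      if gate ≠ 0 ∧ prev_gate = 0 then
        ((if current ≠ [] then notes ++ [current] else notes), [(fl, fh, ctrl)], gate)
      else if current ≠ [] then
        (notes, current ++ [(fl, fh, ctrl)], gate)
      else
        (notes, current, gate))
    ([], [], 0)
  if fin.2.1 ≠ [] then fin.1 ++ [fin.2.1] else fin.1

-- ===== PORT B =====
-- B-side helpers (Source B's local functions gate/tri)
def pvGate (voice_off : Int) (r : List Int) : Int :=
  PySem.Int.band (PySem.List.pyGetD r (voice_off + 4) 0) 1

def pvTri (voice_off : Int) (r : List Int) : Int × Int × Int :=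
  (PySem.List.pyGetD r voice_off 0, PySem.List.pyGetD r (voice_off + 1) 0,
   PySem.List.pyGetD r (voice_off + 4) 0)

-- two passes: edge flags first, then a fold over the reversed (frame, edge) pairs
def segment_notes_alt (frames : List (List Int)) (voice_off : Int) : List (List (Int × Int × Int)) :=
  let gates := frames.map (pvGate voice_off)
  let edges := (gates.zip (0 :: gates)).map (fun gp => decide (gp.1 ≠ 0 ∧ gp.2 = 0))
  let fin := ((frames.zip edges).reverse).foldl
    (fun (st : List (Int × Int × Int) × List (List (Int × Int × Int))) re =>
      if re.2 then ([], (pvTri voice_off re.1 :: st.1) :: st.2)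
      else (pvTri voice_off re.1 :: st.1, st.2))
    ([], [])
  fin.2

-- ===== PRECONDITION & SPEC =====
-- exactly the inputs where Python A returns: every frame admits the three indexings
def Pre_segment_notes (frames : List (List Int)) (voice_off : Int) : Prop :=
  ∀ r ∈ frames, PySem.Raise.InRange r.length voice_off ∧
    PySem.Raise.InRange r.length (voice_off + 1) ∧
    PySem.Raise.InRange r.length (voice_off + 4)
instance (frames : List (List Int)) (voice_off : Int) : Decidable (Pre_segment_notes frames voice_off) := by unfold Pre_segment_notes; infer_instance

def pvWitness_segment_notes : List (List Int) × Int := ([[1, 2, 0, 0, 1], [3, 4, 0, 0, 0]], 0)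

def Spec_segment_notes (frames : List (List Int)) (voice_off : Int) (out : List (List (Int × Int × Int))) : Prop := out = segment_notes_alt frames voice_off
instance (frames : List (List Int)) (voice_off : Int) (out : List (List (Int × Int × Int))) : Decidable (Spec_segment_notes frames voice_off out) := by unfold Spec_segment_notes; infer_instance

-- ===== CLAIM (what is proved, stated in full; the proofs are below) =====
def Claim_equal_segment_notes : Prop := ∀ (frames : List (List Int)) (voice_off : Int), Dom_segment_notes frames voice_off → Pre_segment_notes frames voice_off → Spec_segment_notes frames voice_off (segment_notes frames voice_off)

-- ===== LEMMAS AND PROOFS =====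

-- reference segmentation: pvRR vo prev xs = (frames of xs before its first rising
-- edge, segments of xs), where an edge needs gate ≠ 0 and previous gate prev = 0
def pvRR (vo : Int) (prev : Int) : List (List Int) → List (Int × Int × Int) × List (List (Int × Int × Int))
  | [] => ([], [])
  | r :: rest =>
    let res := pvRR vo (pvGate vo r) rest
    if pvGate vo r ≠ 0 ∧ prev = 0 then ([], (pvTri vo r :: res.1) :: res.2)
    else (pvTri vo r :: res.1, res.2)

-- A's loop step and epilogue, named so the fold lemma can be stated cleanly
def pvStepA (vo : Int) (st : List (List (Int × Int × Int)) × List (Int × Int × Int) × Int)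
    (regs : List Int) : List (List (Int × Int × Int)) × List (Int × Int × Int) × Int :=
  let notes := st.1
  let current := st.2.1
  let prev_gate := st.2.2
  let fl := PySem.List.pyGetD regs vo 0
  let fh := PySem.List.pyGetD regs (vo + 1) 0
  let ctrl := PySem.List.pyGetD regs (vo + 4) 0
  let gate := PySem.Int.band ctrl 1
  if gate ≠ 0 ∧ prev_gate = 0 then
    ((if current ≠ [] then notes ++ [current] else notes), [(fl, fh, ctrl)], gate)
  else if current ≠ [] then
    (notes, current ++ [(fl, fh, ctrl)], gate)
  else
    (notes, current, gate)

def pvFinishA (fin : List (List (Int × Int × Int)) × List (Int × Int × Int) × Int) :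
    List (List (Int × Int × Int)) :=
  if fin.2.1 ≠ [] then fin.1 ++ [fin.2.1] else fin.1

-- A's fold, characterized against pvRR (generalizing the whole loop state)
theorem pvA_fold (vo : Int) (xs : List (List Int))
    (notes : List (List (Int × Int × Int))) (current : List (Int × Int × Int)) (prev : Int) :
    pvFinishA (xs.foldl (pvStepA vo) (notes, current, prev)) =
    notes ++ (if current = [] then (pvRR vo prev xs).2
              else (current ++ (pvRR vo prev xs).1) :: (pvRR vo prev xs).2) := by
  induction xs generalizing notes current prev with
  | nil =>
    by_cases h : current = [] <;> simp [h, pvRR, pvFinishA]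
  | cons r rest ih =>
    have hstep : pvStepA vo (notes, current, prev) r =
        (if pvGate vo r ≠ 0 ∧ prev = 0 then
          ((if current ≠ [] then notes ++ [current] else notes), [pvTri vo r], pvGate vo r)
        else if current ≠ [] then
          (notes, current ++ [pvTri vo r], pvGate vo r)
        else
          (notes, current, pvGate vo r)) := rfl
    rw [List.foldl_cons, hstep]
    simp only [pvRR]
    by_cases he : pvGate vo r ≠ 0 ∧ prev = 0
    · simp only [if_pos he, ih]
      by_cases h : current = [] <;> simp [h]
    · simp only [if_neg he]
      by_cases h : current = []
      · simp only [h, ne_eq, not_true_eq_false, if_false, ih]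
        simp
      · simp only [ne_eq, h, not_false_eq_true, if_true, ih]
        simp [h]

-- B's reversed fold, characterized against pvRR (generalizing the initial gate prev)
theorem pvB_fold (vo : Int) (xs : List (List Int)) (prev : Int) :
    ((xs.zip (((xs.map (pvGate vo)).zip (prev :: xs.map (pvGate vo))).map
        (fun gp => decide (gp.1 ≠ 0 ∧ gp.2 = 0)))).reverse.foldl
      (fun (st : List (Int × Int × Int) × List (List (Int × Int × Int))) re =>
        if re.2 then ([], (pvTri vo re.1 :: st.1) :: st.2)
        else (pvTri vo re.1 :: st.1, st.2))
      ([], [])) = pvRR vo prev xs := by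
  induction xs generalizing prev with
  | nil => simp [pvRR]
  | cons r rest ih =>
    simp only [List.map_cons, List.zip_cons_cons, List.map, List.reverse_cons,
      List.foldl_append, List.foldl_cons, List.foldl_nil, pvRR]
    rw [ih (pvGate vo r)]
    by_cases he : pvGate vo r ≠ 0 ∧ prev = 0 <;> simp [he]

theorem segment_notes_eq (frames : List (List Int)) (voice_off : Int) :
    segment_notes frames voice_off = segment_notes_alt frames voice_off := by
  have hA : segment_notes frames voice_off =
      pvFinishA (frames.foldl (pvStepA voice_off) ([], [], 0)) := rfl
  have hB : segment_notes_alt frames voice_off =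
      ((frames.zip (((frames.map (pvGate voice_off)).zip
          ((0 : Int) :: frames.map (pvGate voice_off))).map
          (fun gp => decide (gp.1 ≠ 0 ∧ gp.2 = 0)))).reverse.foldl
        (fun (st : List (Int × Int × Int) × List (List (Int × Int × Int))) re =>
          if re.2 then ([], (pvTri voice_off re.1 :: st.1) :: st.2)
          else (pvTri voice_off re.1 :: st.1, st.2))
        ([], [])).2 := rfl
  rw [hA, pvA_fold, hB, pvB_fold]
  simp

-- ===== VERDICT (by name: the statement is the Claim_ definition above) =====
theorem segment_notes_spec : Claim_equal_segment_notes := by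
  intro frames voice_off _ _
  exact segment_notes_eq frames voice_off
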